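-- pv_equiv track=rewrite | github.com/PranavDeepakSathya/theCudaBender | layout_module/flat_algebra.py | lex_inv
-- ===== SOURCE A (Python) =====
-- from typing import Tuple, Union, List
-- from functools import reduce
-- from operator import mul
--
-- def get_row_major_stride(shape: Tuple[int]):
--   row_major = [1]*len(shape)
--   for i in reversed(range(len(shape)-1)):
--     row_major[i] = row_major[i+1]*shape[i+1]
--   return tuple(row_major)
--
-- def lex_inv(shape: Tuple[int], idx: int):
--   size = reduce(mul,shape,1)
--   assert 0 <= idx < size
--   rs_stride = get_row_major_stride(shape)
--   res = []
--   for i in range(len(shape)):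
--     res.append((idx//rs_stride[i])%shape[i])
--
--   return tuple(res)
-- ===== SOURCE B (Python) =====
-- from functools import reduce
-- from operator import mul
--
-- def lex_inv(shape, idx):
--     size = reduce(mul, shape, 1)
--     assert 0 <= idx < size
--     res = []
--     for i in reversed(range(len(shape))):
--         idx, c = divmod(idx, shape[i])
--         res.append(c)
--     res.reverse()
--     return tuple(res)
-- ===== Notes on version B (the rewrite author's own statement) =====
-- stated objective: simpler
-- what changed: B drops the stride table and its helper entirely: one right-to-left pass of divmod peels off each coordinate, then the collected list is reversed.
-- outside the precondition, e.g. on lex_inv((-3, -3, 2), 1): A returns (-1, 0, 1), B returns (0, 0, 1)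
import Mathlib
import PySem

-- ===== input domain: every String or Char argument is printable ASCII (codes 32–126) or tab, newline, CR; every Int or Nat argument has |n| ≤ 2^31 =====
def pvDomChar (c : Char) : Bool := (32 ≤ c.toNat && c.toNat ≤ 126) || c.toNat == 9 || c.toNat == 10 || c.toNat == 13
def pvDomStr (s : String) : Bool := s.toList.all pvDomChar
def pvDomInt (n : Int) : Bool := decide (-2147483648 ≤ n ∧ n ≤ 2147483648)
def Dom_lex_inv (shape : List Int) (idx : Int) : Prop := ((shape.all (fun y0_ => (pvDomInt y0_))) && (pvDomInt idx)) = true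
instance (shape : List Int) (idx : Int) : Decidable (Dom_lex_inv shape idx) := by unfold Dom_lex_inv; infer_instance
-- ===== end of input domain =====

-- B replaces A's stride table and helper by a single right-to-left divmod pass (objective: simpler).

-- ===== PORT A =====
-- get_row_major_stride: row_major[i] = row_major[i+1] * shape[i+1], filled right to left
def strideA : List Int → List Int
  | [] => []
  | [_] => [1]
  | _ :: d :: rest =>
      let s := strideA (d :: rest)
      (s.headD 1 * d) :: s

def lex_inv (shape : List Int) (idx : Int) : List Int :=
  let size := shape.foldl (· * ·) 1
  if 0 ≤ idx ∧ idx < size then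
    -- for i in range(len(shape)): res.append((idx // rs_stride[i]) % shape[i])
    (shape.zip (strideA shape)).map
      (fun p => PySem.Int.mod (PySem.Int.floordiv idx p.2) p.1)
  else []  -- the assert raises here; these inputs are outside Pre_lex_inv

-- ===== PORT B =====
-- for i in reversed(range(len(shape))): idx, c = divmod(idx, shape[i]); res.append(c)
def altGo : List Int → Int → List Int → List Int
  | [], _, res => res
  | d :: rest, idx, res =>
      altGo rest (PySem.Int.floordiv idx d) (res ++ [PySem.Int.mod idx d])

def lex_inv_alt (shape : List Int) (idx : Int) : List Int :=
  let size := shape.foldl (· * ·) 1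
  if 0 ≤ idx ∧ idx < size then (altGo shape.reverse idx []).reverse
  else []  -- the assert raises here; outside Pre_lex_inv

-- ===== PRECONDITION & SPEC =====
-- Pre_ excludes inputs where A's assert raises (idx outside [0, size)), and shapes containing a
-- nonpositive entry: negative dimension sizes are outside the natural domain of the function and
-- the coordinates either program returns there are accidental.
def Pre_lex_inv (shape : List Int) (idx : Int) : Prop :=
  (∀ d ∈ shape, 0 < d) ∧ 0 ≤ idx ∧ idx < shape.foldl (· * ·) 1
instance (shape : List Int) (idx : Int) : Decidable (Pre_lex_inv shape idx) := by
  unfold Pre_lex_inv; infer_instance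

def pvWitness_lex_inv : List Int × Int := ([2, 3], 4)

def Spec_lex_inv (shape : List Int) (idx : Int) (out : List Int) : Prop := out = lex_inv_alt shape idx
instance (shape : List Int) (idx : Int) (out : List Int) : Decidable (Spec_lex_inv shape idx out) := by
  unfold Spec_lex_inv; infer_instance

-- ===== CLAIM (what is proved, stated in full; the proofs are below) =====
def Claim_equal_lex_inv : Prop := ∀ (shape : List Int) (idx : Int), Dom_lex_inv shape idx → Pre_lex_inv shape idx → Spec_lex_inv shape idx (lex_inv shape idx)

-- ===== LEMMAS AND PROOFS =====

theorem strideA_length (l : List Int) : (strideA l).length = l.length := by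
  induction l with
  | nil => rfl
  | cons a t ih =>
      cases t with
      | nil => rfl
      | cons b r => simp only [strideA, List.length_cons] at ih ⊢; omega

theorem strideA_pos : ∀ (l : List Int), (∀ d ∈ l, 0 < d) → ∀ x ∈ strideA l, 0 < x := by
  intro l
  induction l with
  | nil => intro _ x hx; simp [strideA] at hx
  | cons a t ih =>
      intro hpos x hx
      cases t with
      | nil => simp [strideA] at hx; omega
      | cons b r =>
          simp only [strideA, List.mem_cons] at hx
          have ih' := ih (fun d hd => hpos d (List.mem_cons_of_mem a hd))
          rcases hx with h | h
          · cases hs : strideA (b :: r) with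
            | nil => have := strideA_length (b :: r); rw [hs] at this; simp at this
            | cons y ys =>
                have hy : 0 < y := ih' y (by rw [hs]; exact List.mem_cons_self)
                have hb : 0 < b := hpos b (by simp)
                rw [h, hs]; simpa using mul_pos hy hb
          · exact ih' x h

theorem strideA_append (s : List Int) (d : Int) :
    strideA (s ++ [d]) = (strideA s).map (· * d) ++ [1] := by
  induction s with
  | nil => rfl
  | cons a t ih =>
      cases t with
      | nil => simp [strideA]
      | cons b r =>
          have hcons : ∃ y ys, strideA (b :: r) = y :: ys := by
            cases hs : strideA (b :: r) with
            | nil => have := strideA_length (b :: r); rw [hs] at this; simp at this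
            | cons y ys => exact ⟨y, ys, rfl⟩
          obtain ⟨y, ys, hs⟩ := hcons
          simp only [List.cons_append, strideA] at ih ⊢
          rw [ih, hs]
          simp [mul_right_comm]

theorem altGo_acc (l : List Int) : ∀ (idx : Int) (res : List Int),
    altGo l idx res = res ++ altGo l idx [] := by
  induction l with
  | nil => intro idx res; simp [altGo]
  | cons d rest ih =>
      intro idx res
      rw [altGo, altGo, ih, ih (PySem.Int.floordiv idx d) ([] ++ [PySem.Int.mod idx d])]
      simp

theorem fdiv_assoc (a b c : Int) (hb : 0 < b) (hc : 0 < c) :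
    PySem.Int.floordiv a (b * c) = PySem.Int.floordiv (PySem.Int.floordiv a c) b := by
  rw [PySem.Int.floordiv_eq_ediv_of_pos (mul_pos hb hc),
      PySem.Int.floordiv_eq_ediv_of_pos hc, PySem.Int.floordiv_eq_ediv_of_pos hb,
      mul_comm b c, Int.ediv_ediv_of_nonneg (le_of_lt hc)]

-- core equality: the two coordinate computations agree for any idx on positive shapes
theorem core_eq : ∀ (shape : List Int), (∀ d ∈ shape, 0 < d) → ∀ (idx : Int),
    (shape.zip (strideA shape)).map
      (fun p => PySem.Int.mod (PySem.Int.floordiv idx p.2) p.1)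
    = (altGo shape.reverse idx []).reverse := by
  intro shape
  induction shape using List.reverseRecOn with
  | nil => intro _ idx; rfl
  | append_singleton s d ih =>
      intro hpos idx
      have hd : 0 < d := hpos d (by simp)
      have hs : ∀ x ∈ s, 0 < x := fun x hx => hpos x (by simp [hx])
      have hlen : s.length = ((strideA s).map (· * d)).length := by
        simp [strideA_length]
      -- left side
      rw [strideA_append, List.zip_append hlen, List.map_append]
      have hmap :
          ((s.zip ((strideA s).map (· * d))).map
            (fun p => PySem.Int.mod (PySem.Int.floordiv idx p.2) p.1))
          = (s.zip (strideA s)).map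
              (fun p => PySem.Int.mod (PySem.Int.floordiv (PySem.Int.floordiv idx d) p.2) p.1) := by
        rw [List.zip_map_right, List.map_map]
        apply List.map_congr_left
        intro p hp
        obtain ⟨x, y⟩ := p
        have hmem := List.of_mem_zip hp
        have hst : 0 < y := strideA_pos s hs y hmem.2
        simp only [Function.comp, Prod.map, id]
        rw [fdiv_assoc idx y d hst hd]
      rw [hmap, ih hs (PySem.Int.floordiv idx d)]
      -- right side
      rw [List.reverse_append]
      simp only [List.reverse_cons, List.reverse_nil, List.nil_append, List.singleton_append,
        altGo, List.nil_append]
      rw [altGo_acc s.reverse (PySem.Int.floordiv idx d) [PySem.Int.mod idx d],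
        List.reverse_append]
      simp

-- ===== VERDICT (by name: the statement is the Claim_ definition above) =====
theorem lex_inv_spec : Claim_equal_lex_inv := by
  intro shape idx _ hpre
  unfold Spec_lex_inv lex_inv lex_inv_alt
  obtain ⟨hpos, hlo, hhi⟩ := hpre
  rw [if_pos ⟨hlo, hhi⟩, if_pos ⟨hlo, hhi⟩]
  exact core_eq shape hpos idx
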